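-- pv_equiv track=rewrite | github.com/raghureddy031/itp-w1-create-box | create_box/main.py | create_box
-- ===== SOURCE A (Python) =====
-- def create_box(height, width, character):
-- 	i = 0
-- 	j = 0
-- 	ch = ''
-- 	if width >= 1 and height >= 1:
-- 		for i in range(i, height):
-- 			for j in range(0, width):
-- 				ch = ch + character
-- 			else:
-- 				ch = ch + '\n'
-- 		return ch
-- 	else:
-- 		return 'Enter correct details'
-- ===== SOURCE B (Python) =====
-- def create_box(height, width, character):
--     if width >= 1 and height >= 1:
--         return (character * width + '\n') * height
--     return 'Enter correct details'
-- ===== Notes on version B (the rewrite author's own statement) =====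
-- stated objective: simpler
-- what changed: Replaced the nested character-by-character accumulation loops with a single closed-form string expression: one row is built by string repetition (character*width + '\n') and repeated height times.
import Mathlib
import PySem

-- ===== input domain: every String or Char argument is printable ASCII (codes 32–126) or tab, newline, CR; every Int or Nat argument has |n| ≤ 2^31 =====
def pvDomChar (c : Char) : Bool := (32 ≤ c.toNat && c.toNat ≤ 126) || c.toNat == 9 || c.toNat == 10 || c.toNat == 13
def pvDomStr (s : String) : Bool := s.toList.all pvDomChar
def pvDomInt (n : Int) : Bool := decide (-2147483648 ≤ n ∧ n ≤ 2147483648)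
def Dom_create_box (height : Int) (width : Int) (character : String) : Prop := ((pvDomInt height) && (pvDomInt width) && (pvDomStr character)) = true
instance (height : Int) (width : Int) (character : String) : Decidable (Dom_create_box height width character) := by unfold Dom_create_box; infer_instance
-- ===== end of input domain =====

-- B replaces the nested accumulation loops by a closed-form expression: one row repeated height times (objective: simpler).
-- ===== PORT A =====
def create_box (height : Int) (width : Int) (character : String) : String :=
  let i : Int := 0
  let ch : String := ""
  if width ≥ 1 ∧ height ≥ 1 then
    (PySem.List.pyRange i height 1).foldl
      (fun ch _ =>
        ((PySem.List.pyRange 0 width 1).foldl (fun ch _ => ch ++ character) ch) ++ "\n")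
      ch
  else "Enter correct details"

-- ===== PORT B =====
def create_box_alt (height : Int) (width : Int) (character : String) : String :=
  if width ≥ 1 ∧ height ≥ 1 then
    String.ofList (PySem.List.pyRepeat (PySem.List.pyRepeat character.toList width ++ "\n".toList) height)
  else "Enter correct details"

-- ===== PRECONDITION & SPEC =====
def Spec_create_box (height : Int) (width : Int) (character : String) (out : String) : Prop := out = create_box_alt height width character
instance (height : Int) (width : Int) (character : String) (out : String) : Decidable (Spec_create_box height width character out) := by unfold Spec_create_box; infer_instance

-- ===== CLAIM (what is proved, stated in full; the proofs are below) =====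
def Claim_equal_create_box : Prop := ∀ (height : Int) (width : Int) (character : String), Dom_create_box height width character → Spec_create_box height width character (create_box height width character)

-- ===== LEMMAS AND PROOFS =====

theorem inner_fold (l : List Int) (s c : String) :
    (l.foldl (fun ch _ => ch ++ c) s).toList
      = s.toList ++ (List.replicate l.length c.toList).flatten := by
  induction l generalizing s with
  | nil => simp
  | cons x t ih => simp [List.foldl_cons, ih, List.replicate_succ]

theorem outer_fold (l : List Int) (s : String) (w : Int) (c : String) :
    (l.foldl (fun ch _ =>
        ((PySem.List.pyRange 0 w 1).foldl (fun ch _ => ch ++ c) ch) ++ "\n") s).toList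
      = s.toList ++ (List.replicate l.length
          ((List.replicate (PySem.List.pyRange 0 w 1).length c.toList).flatten ++ ['\n'])).flatten := by
  induction l generalizing s with
  | nil => simp
  | cons x t ih => simp [List.foldl_cons, ih, inner_fold, List.replicate_succ]

-- ===== VERDICT (by name: the statement is the Claim_ definition above) =====
theorem create_box_spec : Claim_equal_create_box := by
  intro height width character _
  unfold Spec_create_box create_box create_box_alt
  by_cases h : width ≥ 1 ∧ height ≥ 1
  · simp only [h]
    apply String.ext
    have := outer_fold (PySem.List.pyRange 0 height 1) "" width character
    simpa [PySem.List.pyRepeat, PySem.List.length_pyRange_one, String.toList_ofList] using this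
  · simp [h]
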